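/- GENERATED by tools/from_farm_form.py from prooffarm-gif/accepted/DGifSlurp.7/Proof.lean (a worked proof of the farm's unit `DGifSlurp.7`,
   accepted by the verdict) — do not edit. -/
import Gif.Spec.Units.DGifSlurp_7
import Gif.Spec.AllSegs

open X86 X86.User Asan ProgX.Base ProgX.Base.Spec Gif.Spec

set_option maxRecDepth 4000
set_option maxHeartbeats 4000000

/-!
  `DGifSlurp.7` (0x10a948 … 0x10a96a, 7 instructions; dgif_lib.c:1241-1242): THE HEAD OF THE PASS LOOP of an interlaced image.
  `cmp r15d, 3 ; jg 10a7d4`: `i ≥ 4`: nothing stored, `IR` at the move (0x10a7d4). Otherwise `rbx = i` (`movsxd`), the checked load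
  of `InterlacedOffset[i]` (`141340H + 4 · i`: inside the registered global `Ctx.offs`; its value 0, 4, 2 or 1 by `Consts.offs`) into
  `r13d`: `RowHead` at 0x10a96a with the measure `b = Height − j`. The only store is the return address of the check call, at
  `RA − 160` (one step of `store_stack`). The blocks below:
    1. three pure facts: the index is one of four words, the address as a number, the table's values;
    2. the prelude: the entry assertion `PassHead` as walker facts; where pv is (for `LZOK`); `r15` as a word variable `i ≤ 4`;
    3. ONE walk to both exits; the check goal: inside the registered global;
    4. the two exit assertions, field by field.
-/

namespace Gif.Spec.DGifSlurp_7

/-- The pass index `i ≤ 3` in `r15` is one of the four words 0, 1, 2, 3 (a case split replaces word multiplication). -/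
theorem seg7_index (i : Word) (h : i.toNat ≤ 3) : i = 0 ∨ i = 1 ∨ i = 2 ∨ i = 3 := by
  have h0 : i.toNat = 0 ∨ i.toNat = 1 ∨ i.toNat = 2 ∨ i.toNat = 3 := by omega
  rcases h0 with h0 | h0 | h0 | h0
  · left
    exact UInt64.toNat_inj.mp h0
  · right
    left
    exact UInt64.toNat_inj.mp h0
  · right
    right
    left
    exact UInt64.toNat_inj.mp h0
  · right
    right
    right
    exact UInt64.toNat_inj.mp h0

/-- **`&InterlacedOffset[i]`** (10A955H `lea rdi, [rbx * 4 + 141340H]`): the address as a number, for `i ≤ 3`. -/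
theorem seg7_addr (i : Word) (h : i.toNat ≤ 3) : (i * 4 + 1315648).toNat = 0x141340 + 4 * i.toNat := by
  rcases seg7_index i h with e | e | e | e
  all_goals
    rw [e]
    decide

/-- **The value of `InterlacedOffset[n]`** (K1, `Consts.offs`: 0, 4, 2 or 1) is at most 4 for every index `n ≤ 3`. -/
theorem seg7_offs {mem : Mem} (hc : Consts mem) (n : Nat) (h : n ≤ 3) :
    rd mem (0x141340 + 4 * n) 4 ≤ 4 := by
  obtain ⟨h0, h1, h2, h3⟩ := hc.offs
  have hn : n = 0 ∨ n = 1 ∨ n = 2 ∨ n = 3 := by omega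
  rcases hn with e | e | e | e
  · rw [e]
    show rd mem 0x141340 4 ≤ 4
    omega
  · rw [e]
    show rd mem 0x141344 4 ≤ 4
    omega
  · rw [e]
    show rd mem 0x141348 4 ≤ 4
    omega
  · rw [e]
    show rd mem 0x14134c 4 ≤ 4
    omega

end Gif.Spec.DGifSlurp_7

/-- Segment 7 of `DGifSlurp` takes `PassHead` at 0x10a948 to `RowHead` at 0x10a96a (`i ≤ 3`: `j = InterlacedOffset[i]`) or to `IR` at
0x10a7d4 (`i ≥ 4`: the passes are over). -/
theorem Gif.Spec.Proved.DGifSlurp_7_ok : Gif.Spec.DGifSlurp_7.Statement := by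
  intro Lay hLay μ hμ u₀ hcode h_load4 H rest frames F R Hc Fc m a e ret v hat
  -- THE PRELUDE: the entry assertion `PassHead` = `IR` (= `At` (= `Core` + the present heap and forest) + `LZOK` + the last image) + `i + a = 4`
  obtain ⟨hir, hpass⟩ := hat
  obtain ⟨hat, hlz, hlast, hlt⟩ := hir
  obtain ⟨hcore, hregion, hgif, hpv, hinv, hok⟩ := hat
  have he := hcore.entry
  v_entry he
  obtain ⟨henv, hrdi, hcomplete⟩ := hcore.pre
  -- what the walker reads of a segment's entry state: rip, rsp (as `c_rsp`), the registers kept, the text, DF / MXCSR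
  have w_rip := hcore.rip
  have c_rsp : v.reg .rsp = e.reg .rsp - 152 := hcore.rsp
  have w_kept : RegsKept [.rsp] v v := RegsKept.refl _ _
  have w_eq : Mem.EqOn ProgX.Base.L.textLo ProgX.Base.L.textHi u₀.mem v.mem := ProgX.Base.conv_code_eqOn hcore.code
  have hdf := (show abiInv _ from hcore.abi).1
  have hmx := (show abiInv _ from hcore.abi).2
  have hsse := ProgX.Base.sseOK_of_abiInv hcore.abi
  -- the cursor is a stack object of a caller's frame, at or above `RA + 8` (`store_stack` asks it)
  have hcur := henv.ctx.cursor_range henv.heap.inv.shadow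
  -- where pv is (`LZOK` reads `[pv + 8, pv + 48)`: off the stack); only the two bounds stay in the context (no `% 16`)
  have hbase : Hc.base = 0x800000 := hregion.1.trans henv.heap.base
  have hpin := hok.owns.inside hinv.heap (o := (Fc.pv, 24936)) (List.mem_cons_of_mem _ List.mem_cons_self)
  simp only at hpin
  rw [hbase, hpv] at hpin
  have hpv_lo : 0x800040 ≤ F.pv := hpin.1
  have hpv_hi : F.pv + 24936 + 32 ≤ 0xC00000 := hpin.2.2.2.2
  clear hpin
  -- `r15 = i` as a word variable, `i ≤ 4` by the measure: `movsxd rbx, r15d` is `i` itself, `cmp r15d, 3` compares the number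
  obtain ⟨i, c_r15⟩ : ∃ i, v.reg .r15 = i := ⟨_, rfl⟩
  rw [c_r15] at hpass
  have hi31 : i.toNat < 2 ^ 31 := by omega
  have e3 : (3#32).toInt = 3 := by decide
  have eint := part32_toInt_small i hi31
  -- THE WALK, both arms: 0x10a948 `cmp r15d, 3 ; jg` … 0x10a7d4 | 0x10a96a
  u_walk hcode [hμ.vendor, Gif.Spec.sext32_small i hi31] until [Gif.L.DGifSlurp.at_10a96a, Gif.L.DGifSlurp.at_10a7d4]
    span [ProgX.Base.L.textLo, ProgX.Base.L.textHi] side (v_side)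
  case check_10a95d =>
    -- dgif_lib.c:1242 the load of `InterlacedOffset[i]`, `i ≤ 3` (the `jg` fell through): 4 bytes inside the registered global
    have hi3 : i.toNat ≤ 3 := by
      rw [e3, eint] at hbr_10a94c
      omega
    have hun : ShadowUntouched v.mem s_10a95d.mem := by v_untouched
    have haddr := Gif.Spec.DGifSlurp_7.seg7_addr i hi3
    have ho : Gif.Globals.InterlacedOffset.obj ∈ Hc.liveObjs ++ rest := List.mem_append_right _ henv.ctx.offs
    refine ProgX.Base.check_small_other hinv.shadow hun ho (by decide) ?_ ?_
    · rw [haddr]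
      show 0x141340 ≤ _
      omega
    · rw [haddr]
      show _ ≤ 0x141340 + 16
      omega
  · -- EXIT 0x10a7d4 (l.1241 `jg` taken: `i ≥ 4`, the passes are over): nothing was stored, `IR` at the move
    refine ReachVia.done (Or.inr ?_)
    have hcore1 : DGifSlurp.Core Gif.L.DGifSlurp.at_10a7d4 H rest frames F R u₀ e ret s_10a94c := {
      entry := hcore.entry
      pre := hcore.pre
      rip := w_rip
      rsp := w_rsp
      rbp := (w_kept.get .rbp rfl).trans hcore.rbp
      r14 := (w_kept.get .r14 rfl).trans hcore.r14
      slot_r15 := by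
        rw [w_mem]
        exact hcore.slot_r15
      slot_r14 := by
        rw [w_mem]
        exact hcore.slot_r14
      slot_r13 := by
        rw [w_mem]
        exact hcore.slot_r13
      slot_r12 := by
        rw [w_mem]
        exact hcore.slot_r12
      slot_rbp := by
        rw [w_mem]
        exact hcore.slot_rbp
      slot_rbx := by
        rw [w_mem]
        exact hcore.slot_rbx
      slot_ra := by
        rw [w_mem]
        exact hcore.slot_ra
      rem := by
        rw [w_mem]
        exact hcore.rem
      same := by
        rw [w_mem]
        exact hcore.same
      code := ProgX.Base.conv_code_in w_eq
      abi := by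
        refine ProgX.Base.abiInv_of ?_ ?_
        · rw [w_flags]
          simp only [X86.User.df_setStatus]
          exact hdf
        · rw [w_mxcsr]
          exact hmx
    }
    obtain ⟨sv, init, g, r, n, hl1, hl2, hl3⟩ := hlast
    exact {
      at_ := {
        core := hcore1
        region := hregion
        gif := hgif
        pv := hpv
        inv := by
          rw [w_mem]
          exact hinv
        ok := by
          rw [w_mem]
          exact hok
      }
      lz := by
        rw [w_mem]
        exact hlz
      last := by
        refine ⟨sv, init, g, r, n, hl1, hl2, ?_⟩
        rw [w_kept.get .r12 rfl]
        exact hl3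
      lt := by
        rw [w_mem]
        exact hlt
    }
  · -- EXIT 0x10a96a (l.1243): the row head, `j = InterlacedOffset[i]` in `r13d`
    have hi3 : i.toNat ≤ 3 := by
      rw [e3, eint] at hbr_10a94c
      omega
    have haddr := Gif.Spec.DGifSlurp_7.seg7_addr i hi3
    -- the loaded value (K1): at most 4
    have hval : v.mem.readLE (i * 4 + 1315648) 4 ≤ 4 := by
      rw [rd_eq_readLE _ (i * 4 + 1315648) (0x141340 + 4 * i.toNat) 4 haddr]
      exact Gif.Spec.DGifSlurp_7.seg7_offs hok.shape.consts i.toNat hi3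
    obtain ⟨j, hj⟩ : ∃ j : Nat, j = v.mem.readLE (i * 4 + 1315648) 4 := ⟨_, rfl⟩
    rw [← hj] at hval w_r13
    clear hj
    -- the one store since `v`: the check call's return address (stack)
    obtain ⟨hinvA, hokA, hremA⟩ := store_stack hinv hok ⟨hcur.1, hcur.2.1⟩ (e.reg .rsp - 160) 8 1091938
      (by u_omega) (by u_omega)
    have hs : Mem.SameExcept [⟨(e.reg .rsp).toNat - 160, (e.reg .rsp).toNat - 152⟩] v.mem s_10a962.mem := by
      rw [w_mem]
      u_same
    have hlzA : LZOK s_10a962.mem F.pv := by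
      apply hlz.sameExcept hs (by omega)
      intro w hw
      have ew := List.mem_singleton.mp hw
      rw [ew]
      simp only
      omega
    rw [← w_mem] at hinvA hokA hremA
    have k_r15 := hcore.slot_r15
    have k_r14 := hcore.slot_r14
    have k_r13 := hcore.slot_r13
    have k_r12 := hcore.slot_r12
    have k_rbp := hcore.slot_rbp
    have k_rbx := hcore.slot_rbx
    have k_ra := hcore.slot_ra
    have hsame : Mem.SameExcept
      [⟨(e.reg .rsp).toNat - 848, (e.reg .rsp).toNat⟩,
       shadowSpan ((e.reg .rsp).toNat - 152) ((e.reg .rsp).toNat - 56),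
       ⟨0x800000, 0x1000020⟩,
       ⟨R.cur, R.cur + 8⟩] e.mem v.mem := hcore.same
    have hcore1 : DGifSlurp.Core Gif.L.DGifSlurp.at_10a96a H rest frames F R u₀ e ret s_10a962 := {
      entry := hcore.entry
      pre := hcore.pre
      rip := w_rip
      rsp := w_rsp
      rbp := (w_kept.get .rbp rfl).trans hcore.rbp
      r14 := (w_kept.get .r14 rfl).trans hcore.r14
      slot_r15 := by
        rw [w_mem]
        u_frame k_r15
      slot_r14 := by
        rw [w_mem]
        u_frame k_r14
      slot_r13 := by
        rw [w_mem]
        u_frame k_r13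
      slot_r12 := by
        rw [w_mem]
        u_frame k_r12
      slot_rbp := by
        rw [w_mem]
        u_frame k_rbp
      slot_rbx := by
        rw [w_mem]
        u_frame k_rbx
      slot_ra := by
        rw [w_mem]
        u_frame k_ra
      rem := by
        rw [hremA]
        exact hcore.rem
      same := by
        rw [w_mem]
        u_same
      code := ProgX.Base.conv_code_in w_eq
      abi := by
        refine ProgX.Base.abiInv_of ?_ ?_
        · rw [w_flags]
          exact w_df_10a95d
        · rw [w_mxcsr]
          exact hmx
    }
    obtain ⟨sv, init, g, r, n, hl1, hl2, hl3⟩ := hlast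
    -- THE MEASURE of the row loop: `b = Height − j`, whatever it is
    refine ReachVia.done (Or.inl ⟨SavedImage.ImageDesc.Height s_10a962.mem (s_10a962.reg .r12).toNat -
      (s_10a962.reg .r13).toNat, ?_⟩)
    exact {
      ir := {
        at_ := {
          core := hcore1
          region := hregion
          gif := hgif
          pv := hpv
          inv := hinvA
          ok := hokA
        }
        lz := hlzA
        last := by
          refine ⟨sv, init, g, r, n, hl1, hl2, ?_⟩
          rw [w_kept.get .r12 rfl]
          exact hl3
        lt := by
          rw [hremA]
          exact hlt
      }
      pass := by
        rw [w_kept.get .r15 rfl, c_r15]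
        exact hpass
      pass_pos := by omega
      row_int := by
        rw [w_r13, toNat_ofBV32]
        simp only [BitVec.toNat_ofNat]
        omega
      row := rfl
    }
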